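-- pv_equiv track=rewrite | github.com/jxucoder/survival_jax | survival_jax/estimator/utils.py | get_unique_failure_times
-- ===== SOURCE A (Python) =====
-- def get_unique_failure_times(times, events):
--     unique_failure_times = set()
--     for i, (time, event) in enumerate(zip(times, events)):
--         if event:
--             unique_failure_times.add(time)
--     sorted_times = sorted(unique_failure_times)
--     index_dict = {elem: i for i, elem in enumerate(sorted_times)}
--     return sorted_times, index_dict
-- ===== SOURCE B (Python) =====
-- def get_unique_failure_times(times, events):
--     def merge_unique(xs, ys):
--         out = []
--         i = j = 0
--         while i < len(xs) and j < len(ys):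
--             if xs[i] < ys[j]:
--                 out.append(xs[i]); i += 1
--             elif ys[j] < xs[i]:
--                 out.append(ys[j]); j += 1
--             else:
--                 out.append(xs[i]); i += 1; j += 1
--         out.extend(xs[i:])
--         out.extend(ys[j:])
--         return out
--
--     def sort_unique(lst):
--         if len(lst) <= 1:
--             return lst[:]
--         mid = len(lst) // 2
--         return merge_unique(sort_unique(lst[:mid]), sort_unique(lst[mid:]))
--
--     failures = [t for t, e in zip(times, events) if e]
--     sorted_times = sort_unique(failures)
--     index_dict = {t: i for i, t in enumerate(sorted_times)}
--     return sorted_times, index_dict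
-- ===== Notes on version B (the rewrite author's own statement) =====
-- stated objective: alternative
-- what changed: Replaced the set-based deduplication followed by a library sort with a hand-written recursive divide-and-conquer merge sort whose three-way merge discards duplicates in-line, so no set and no library sort are used; the sorted unique list and its index map are then returned as before.
import Mathlib
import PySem

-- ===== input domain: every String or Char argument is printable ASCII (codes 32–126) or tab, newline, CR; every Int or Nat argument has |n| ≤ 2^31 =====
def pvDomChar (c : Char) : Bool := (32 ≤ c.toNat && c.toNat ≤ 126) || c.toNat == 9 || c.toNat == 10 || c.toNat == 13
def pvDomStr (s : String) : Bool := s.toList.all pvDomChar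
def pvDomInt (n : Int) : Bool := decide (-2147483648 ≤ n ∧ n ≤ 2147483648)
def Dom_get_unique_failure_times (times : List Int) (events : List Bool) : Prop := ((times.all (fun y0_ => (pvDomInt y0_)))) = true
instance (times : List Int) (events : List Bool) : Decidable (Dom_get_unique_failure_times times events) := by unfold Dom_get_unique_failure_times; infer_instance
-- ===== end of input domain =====

-- B replaces A's set-dedup + library sort by a recursive merge sort whose three-way merge drops duplicates in-line (alternative algorithm, same cost).


-- ===== PORT A =====
def get_unique_failure_times (times : List Int) (events : List Bool) : List Int × (List (Int × Int)) :=
  -- for i, (time, event) in enumerate(zip(times, events)): if event: unique_failure_times.add(time)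
  let unique_failure_times : PySem.Set Int :=
    (PySem.List.enumerate (times.zip events) 0).foldl
      (fun s p => if p.2.2 then PySem.Set.add s p.2.1 else s) PySem.Set.empty
  let sorted_times := PySem.List.sorted unique_failure_times (fun x => x) false
  -- index_dict = {elem: i for i, elem in enumerate(sorted_times)}
  let index_dict : PySem.Dict Int Int :=
    (PySem.List.enumerate sorted_times 0).foldl (fun d p => d.insert p.2 p.1) PySem.Dict.empty
  (sorted_times, index_dict.items)

-- ===== PORT B =====
-- merge_unique: the while-loop over two cursors, rendered as structural recursion on the
-- two suffixes (xs[i:], ys[j:]); out.extend of the leftover suffix is the base case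
def pvMergeU : List Int → List Int → List Int
  | [], ys => ys
  | x :: xs, [] => x :: xs
  | x :: xs, y :: ys =>
    if x < y then x :: pvMergeU xs (y :: ys)
    else if y < x then y :: pvMergeU (x :: xs) ys
    else x :: pvMergeU xs ys

-- sort_unique: lst[:mid] / lst[mid:] with mid = len(lst)//2 are exactly take/drop here
-- (0 ≤ mid ≤ len, so the Python slices equal take/drop)
def pvSortU (l : List Int) : List Int :=
  if l.length ≤ 1 then l
  else pvMergeU (pvSortU (l.take (l.length / 2))) (pvSortU (l.drop (l.length / 2)))
termination_by l.length
decreasing_by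
  · simp only [List.length_take]; omega
  · simp only [List.length_drop]; omega

def get_unique_failure_times_alt (times : List Int) (events : List Bool) : List Int × (List (Int × Int)) :=
  -- failures = [t for t, e in zip(times, events) if e]
  let failures : List Int := ((times.zip events).filter (fun p => p.2)).map (fun p => p.1)
  let sorted_times := pvSortU failures
  -- index_dict = {t: i for i, t in enumerate(sorted_times)}
  let index_dict : PySem.Dict Int Int :=
    (PySem.List.enumerate sorted_times 0).foldl (fun d p => d.insert p.2 p.1) PySem.Dict.empty
  (sorted_times, index_dict.items)

-- ===== PRECONDITION & SPEC =====
def Spec_get_unique_failure_times (times : List Int) (events : List Bool) (out : List Int × (List (Int × Int))) : Prop := out = get_unique_failure_times_alt times events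
instance (times : List Int) (events : List Bool) (out : List Int × (List (Int × Int))) : Decidable (Spec_get_unique_failure_times times events out) := by unfold Spec_get_unique_failure_times; infer_instance

-- ===== CLAIM =====
def Claim_equal_get_unique_failure_times : Prop := ∀ (times : List Int) (events : List Bool), Dom_get_unique_failure_times times events → Spec_get_unique_failure_times times events (get_unique_failure_times times events)

-- ===== LEMMAS AND PROOFS =====

theorem pv_foldl_enumerate_snd {α β : Type} (f : β → α → β) (xs : List α) (s : Int) (init : β) :
    (PySem.List.enumerate xs s).foldl (fun b p => f b p.2) init = xs.foldl f init := by
  induction xs generalizing s init with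
  | nil => simp [PySem.List.enumerate_nil]
  | cons x xs ih => simp [PySem.List.enumerate_cons, ih]

-- the duplicate-dropping merge of two strictly increasing lists is strictly increasing,
-- with membership the union of the inputs' memberships
theorem pv_mergeU_spec (xs ys : List Int) (hx : xs.Pairwise (· < ·)) (hy : ys.Pairwise (· < ·)) :
    (pvMergeU xs ys).Pairwise (· < ·) ∧ ∀ a, a ∈ pvMergeU xs ys ↔ a ∈ xs ∨ a ∈ ys := by
  induction xs, ys using pvMergeU.induct with
  | case1 ys => simp [pvMergeU, hy]
  | case2 x xs => simp [pvMergeU, hx]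
  | case3 x xs y ys hlt ih =>
    have hx' := (List.pairwise_cons.mp hx).2
    obtain ⟨ihp, ihm⟩ := ih hx' hy
    constructor
    · rw [pvMergeU, if_pos hlt, List.pairwise_cons]
      refine ⟨?_, ihp⟩
      intro a ha
      rcases (ihm a).mp ha with h | h
      · exact (List.pairwise_cons.mp hx).1 a h
      · rcases List.mem_cons.mp h with rfl | h
        · exact hlt
        · have := (List.pairwise_cons.mp hy).1 a h; omega
    · intro a
      rw [pvMergeU, if_pos hlt]
      simp only [List.mem_cons, ihm, List.mem_cons]
      tauto
  | case4 x xs y ys hlt hgt ih =>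
    have hy' := (List.pairwise_cons.mp hy).2
    obtain ⟨ihp, ihm⟩ := ih hx hy'
    constructor
    · rw [pvMergeU, if_neg hlt, if_pos hgt, List.pairwise_cons]
      refine ⟨?_, ihp⟩
      intro a ha
      rcases (ihm a).mp ha with h | h
      · rcases List.mem_cons.mp h with rfl | h
        · exact hgt
        · have := (List.pairwise_cons.mp hx).1 a h; omega
      · exact (List.pairwise_cons.mp hy).1 a h
    · intro a
      rw [pvMergeU, if_neg hlt, if_pos hgt]
      simp only [List.mem_cons, ihm, List.mem_cons]
      tauto
  | case5 x xs y ys hlt hgt ih =>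
    have hxy : x = y := by omega
    have hx' := (List.pairwise_cons.mp hx).2
    have hy' := (List.pairwise_cons.mp hy).2
    obtain ⟨ihp, ihm⟩ := ih hx' hy'
    constructor
    · rw [pvMergeU, if_neg hlt, if_neg hgt, List.pairwise_cons]
      refine ⟨?_, ihp⟩
      intro a ha
      rcases (ihm a).mp ha with h | h
      · exact (List.pairwise_cons.mp hx).1 a h
      · have := (List.pairwise_cons.mp hy).1 a h; omega
    · intro a
      rw [pvMergeU, if_neg hlt, if_neg hgt]
      simp only [List.mem_cons, ihm, List.mem_cons]
      constructor
      · tauto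
      · rintro ((rfl | h) | (rfl | h)) <;> simp_all
  
-- pvSortU produces a strictly increasing list with the same members as its input
theorem pv_sortU_spec (l : List Int) :
    (pvSortU l).Pairwise (· < ·) ∧ ∀ a, a ∈ pvSortU l ↔ a ∈ l := by
  induction l using pvSortU.induct with
  | case1 l h => rw [pvSortU, if_pos h]
                 match l, h with
                 | [], _ => simp
                 | [x], _ => simp
  | case2 l h ih1 ih2 =>
    obtain ⟨p1, m1⟩ := ih1
    obtain ⟨p2, m2⟩ := ih2
    obtain ⟨pm, mm⟩ := pv_mergeU_spec _ _ p1 p2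
    rw [pvSortU, if_neg h]
    refine ⟨pm, ?_⟩
    intro a
    rw [mm a, m1, m2]
    constructor
    · rintro (h | h)
      exacts [List.mem_of_mem_take h, List.mem_of_mem_drop h]
    · intro ha
      rw [← List.take_append_drop (l.length / 2) l] at ha
      exact List.mem_append.mp ha

theorem get_unique_failure_times_spec : Claim_equal_get_unique_failure_times := by
  intro times events _
  unfold Spec_get_unique_failure_times
  simp only [get_unique_failure_times, get_unique_failure_times_alt]
  set ft : List Int := ((times.zip events).filter (fun p => p.2)).map (fun p => p.1) with hft
  -- A's set-collecting loop yields the distinct elements of ft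
  have hA1 : (PySem.List.enumerate (times.zip events) 0).foldl
      (fun s p => if p.2.2 then PySem.Set.add s p.2.1 else s) PySem.Set.empty
      = PySem.Set.ofList ft := by
    rw [pv_foldl_enumerate_snd (f := fun (s : PySem.Set Int) (q : Int × Bool) => if q.2 then PySem.Set.add s q.1 else s)]
    rw [PySem.List.foldl_if_eq_foldl_filter (p := fun q : Int × Bool => q.2)
      (f := fun s q => PySem.Set.add s q.1)]
    rw [hft, PySem.Set.ofList_eq_foldl, List.foldl_map]
    rfl
  rw [hA1]
  -- A's library sort of the set equals B's duplicate-dropping merge sort of ft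
  obtain ⟨hpw, hmem⟩ := pv_sortU_spec ft
  have hmem' : ∀ x, x ∈ pvSortU ft ↔ x ∈ PySem.Set.ofList ft := by
    intro x; rw [hmem, PySem.Set.mem_ofList]
  have hperm : (pvSortU ft).Perm (PySem.Set.ofList ft) :=
    (List.perm_ext_iff_of_nodup (hpw.imp (fun h => ne_of_lt h)) (PySem.Set.nodup_ofList ft)).mpr hmem'
  have hu : PySem.List.sorted (PySem.Set.ofList ft) (fun x => x) false = pvSortU ft :=
    PySem.List.sorted_eq_of_perm_of_pairwise_lt _ _ _ hperm hpw
  rw [hu]
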